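-- pv_equiv track=rewrite | github.com/youngbucu/Studia | WDI/zestaw2/zad8wersja1.py | pdc
-- ===== SOURCE A (Python) =====
-- def fib(n):
--     a=1
--     b=1
--     if n==1 or n==2:
--         return a
--     else:
--         for i in range(2,n):
--             tmp=a
--             a=b
--             b=b+tmp
--         return b
--
-- def df(k):
--     n=1
--     while fib(n)<k:
--         n+=1
--     return n
--
-- def pdc(x):
--     z=0
--     for i in range(1,df(x)):
--         s=fib(i)
--         for j in range(i+1,df(x)):
--             s=s+fib(j)
--             if s==x:
--                 z=1
--     if z==1:
--         return False
--     else: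
--         return True
-- ===== SOURCE B (Python) =====
-- def pdc(x):
--     fibs = [1, 1]
--     while fibs[-1] < x:
--         fibs.append(fibs[-1] + fibs[-2])
--     lo = 0
--     s = 0
--     for hi in range(len(fibs)):
--         s += fibs[hi]
--         while s > x and lo < hi:
--             s -= fibs[lo]
--             lo += 1
--         if s == x and lo < hi:
--             return False
--     return True
-- ===== Notes on version B (the rewrite author's own statement) =====
-- stated objective: faster
-- what changed: A rescans all start/end index pairs below df(x) and recomputes each Fibonacci number from scratch inside the nested loops (and re-derives df(x) per iteration); B builds the Fibonacci list up to x once and finds a consecutive-sum window with a single two-pointer sliding-window pass over it.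
import Mathlib
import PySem

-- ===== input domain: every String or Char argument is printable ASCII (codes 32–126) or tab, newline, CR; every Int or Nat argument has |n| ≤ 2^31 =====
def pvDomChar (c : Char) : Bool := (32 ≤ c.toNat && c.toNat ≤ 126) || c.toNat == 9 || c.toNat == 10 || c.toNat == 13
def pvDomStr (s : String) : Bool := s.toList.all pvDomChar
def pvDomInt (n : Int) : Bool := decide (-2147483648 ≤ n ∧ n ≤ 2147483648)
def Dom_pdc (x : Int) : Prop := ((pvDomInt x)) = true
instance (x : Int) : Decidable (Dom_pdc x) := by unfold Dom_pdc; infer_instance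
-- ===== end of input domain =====

-- B replaces A's O(m^3) nested rescans (fib recomputed from scratch for every index) by one
-- fib table built once and a two-pointer sliding window over it; objective: faster.


-- ===== PORT A =====
-- fib(n): 1-indexed Fibonacci by a fresh loop each call
def fibA (n : Int) : Int :=
  if n == 1 || n == 2 then 1
  else ((PySem.List.pyRange 2 n 1).foldl (fun (ab : Int × Int) _ => (ab.2, ab.2 + ab.1)) (1, 1)).2

-- df(k): while fib(n) < k: n += 1.  The Python while-loop always terminates (fib is
-- unbounded); fuel 100 is enough for every |k| ≤ 2^31 (fib 47 > 2^31), so the port is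
-- exact on Dom_pdc.
def dfLoop (k : Int) (n : Int) : Nat → Int
  | 0 => n
  | f + 1 => if fibA n < k then dfLoop k (n + 1) f else n

def dfA (k : Int) : Int := dfLoop k 1 100

def pdc (x : Int) : Bool :=
  let z := (PySem.List.pyRange 1 (dfA x) 1).foldl
    (fun (z : Int) (i : Int) =>
      ((PySem.List.pyRange (i + 1) (dfA x) 1).foldl
        (fun (sz : Int × Int) (j : Int) =>
          let s' := sz.1 + fibA j
          (s', if s' == x then 1 else sz.2)) (fibA i, z)).2) 0
  if z == 1 then false else true

-- ===== PORT B =====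
-- fibs = [1,1]; while fibs[-1] < x: fibs.append(fibs[-1] + fibs[-2]).  a = fibs[-2],
-- b = fibs[-1]; fuel 100 covers every |x| ≤ 2^31 (fib 47 > 2^31), so exact on Dom_pdc.
def buildFibs (x : Int) : Nat → List Int → Int → Int → List Int
  | 0, acc, _, _ => acc
  | f + 1, acc, a, b => if b < x then buildFibs x f (acc ++ [a + b]) b (a + b) else acc

-- while s > x and lo < hi: s -= fibs[lo]; lo += 1   (lo is always in range, so getD is exact)
def shrink (x : Int) (fibs : List Int) (hi lo s : Int) : Int × Int :=
  if h : s > x ∧ lo < hi then shrink x fibs hi (lo + 1) (s - PySem.List.pyGetD fibs lo 0)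
  else (lo, s)
termination_by (hi - lo).toNat
decreasing_by omega

-- for hi in range(len(fibs)): s += fibs[hi]; <shrink>; if s == x and lo < hi: return False
def slideGo (x : Int) (fibs : List Int) : List Int → Int → Int → Bool
  | [], _, _ => true
  | hi :: rest, lo, s =>
    let p := shrink x fibs hi lo (s + PySem.List.pyGetD fibs hi 0)
    if p.2 == x && p.1 < hi then false else slideGo x fibs rest p.1 p.2

def pdc_alt (x : Int) : Bool :=
  let fibs := buildFibs x 100 [1, 1] 1 1
  slideGo x fibs (PySem.List.pyRange 0 (fibs.length : Int) 1) 0 0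

-- ===== PRECONDITION & SPEC =====
def Spec_pdc (x : Int) (out : Bool) : Prop := out = pdc_alt x
instance (x : Int) (out : Bool) : Decidable (Spec_pdc x out) := by unfold Spec_pdc; infer_instance

-- ===== CLAIM (what is proved, stated in full; the proofs are below) =====
def Claim_equal_pdc : Prop := ∀ (x : Int), Dom_pdc x → Spec_pdc x (pdc x)

-- ===== LEMMAS AND PROOFS =====

-- the mathematical Fibonacci sequence both programs walk (1-indexed: F 1 = F 2 = 1)
def F (n : Nat) : Int := (Nat.fib n : Int)

-- sum of consecutive Fibonacci numbers F i + … + F j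
def SF (i j : Nat) : Int := ∑ k ∈ Finset.Icc i j, F k

theorem F_one_le {n : Nat} (h : 1 ≤ n) : 1 ≤ F n := by
  unfold F; exact_mod_cast Nat.succ_le_of_lt (Nat.fib_pos.2 h)

theorem F_mono {m n : Nat} (h : m ≤ n) : F m ≤ F n := by
  unfold F; exact_mod_cast Nat.fib_mono h

theorem F_add_two (n : Nat) : F (n + 2) = F n + F (n + 1) := by
  unfold F; push_cast [Nat.fib_add_two]; ring

theorem SF_self (i : Nat) : SF i i = F i := by simp [SF]

theorem SF_empty {i j : Nat} (h : j < i) : SF i j = 0 := by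
  simp [SF, Finset.Icc_eq_empty_of_lt h]

theorem SF_succ_top {i j : Nat} (h : i ≤ j + 1) : SF i (j + 1) = SF i j + F (j + 1) :=
  Finset.sum_Icc_succ_top h F

theorem SF_succ_bot {i j : Nat} (h : i ≤ j) : SF i j = F i + SF (i + 1) j := by
  unfold SF
  rw [← Finset.insert_Icc_add_one_left_eq_Icc h, Finset.sum_insert (by simp)]

theorem SF_pos {i j : Nat} (h1 : 1 ≤ i) (h2 : i ≤ j) : 1 ≤ SF i j := by
  calc (1 : Int) ≤ F i := F_one_le h1
    _ ≤ F i + SF (i+1) j := by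
        rcases Nat.lt_or_ge i j with h | h
        · have := SF_pos (i := i+1) (j := j) (by omega) (by omega)
          omega
        · have hij : i = j := le_antisymm h2 h
          rw [SF_empty (by omega)]; omega
    _ = SF i j := (SF_succ_bot h2).symm
termination_by j - i

-- strict decrease of the window sum as the left end moves right
theorem SF_strict {l l' j : Nat} (h0 : 1 ≤ l) (h1 : l < l') (h2 : l' ≤ j) :
    SF l' j < SF l j := by
  induction l' with
  | zero => omega
  | succ m ih =>
    rcases Nat.lt_or_ge l m with h | h
    · have h3 : SF m j < SF l j := ih h (by omega)
      have h4 : SF m j = F m + SF (m+1) j := SF_succ_bot (by omega)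
      have h5 := F_one_le (n := m) (by omega)
      omega
    · have hlm : l = m := by omega
      subst hlm
      have h4 : SF l j = F l + SF (l+1) j := SF_succ_bot (by omega)
      have := F_one_le h0
      omega

-- last term is strictly below a ≥2-term sum
theorem SF_gt_last {i j : Nat} (h0 : 1 ≤ i) (h1 : i < j) : F j < SF i j := by
  obtain ⟨m, rfl⟩ : ∃ m, j = m + 1 := ⟨j - 1, by omega⟩
  rw [SF_succ_top (by omega)]
  have := SF_pos (i := i) (j := m) h0 (by omega)
  omega

-- ---- fibA and df ----
theorem fibLoop_eq : ∀ m : Nat, 2 ≤ m →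
    (PySem.List.pyRange 2 (m : Int) 1).foldl
      (fun (ab : Int × Int) _ => (ab.2, ab.2 + ab.1)) (1, 1) = (F (m - 1), F m) := by
  intro m hm
  induction m with
  | zero => omega
  | succ c ih =>
    rcases Nat.lt_or_ge c 2 with h | h
    · interval_cases c
      · omega
      · have : PySem.List.pyRange 2 ((1 + 1 : Nat) : Int) 1 = [] :=
          PySem.List.pyRange_one_eq_nil (by norm_num)
        rw [this]
        simp [F]
    · have hr : PySem.List.pyRange 2 ((c : Int) + 1) 1 =
          PySem.List.pyRange 2 (c : Int) 1 ++ [(c : Int)] :=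
        PySem.List.pyRange_one_succ_right (by exact_mod_cast Nat.le_trans (by norm_num) h)
      push_cast
      rw [hr, List.foldl_append, ih h]
      obtain ⟨d, rfl⟩ : ∃ d, c = d + 2 := ⟨c - 2, by omega⟩
      simp only [List.foldl_cons, List.foldl_nil]
      have h2 : F (d + 2 + 1) = F (d + 1) + F (d + 2) := by
        have h := F_add_two (d + 1)
        norm_num at h ⊢
        omega
      have h3 : d + 2 - 1 = d + 1 := rfl
      rw [h3, h2]
      simp only [Prod.mk.injEq, true_and]
      ring

theorem fibA_eq (n : Nat) (h : 1 ≤ n) : fibA (n : Int) = F n := by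
  rcases Nat.lt_or_ge n 3 with h3 | h3
  · interval_cases n
    · rfl
    · rfl
  · have hne : ¬(((n : Int) == 1) || ((n : Int) == 2)) = true := by
      simp; omega
    unfold fibA
    rw [if_neg (by simpa using hne), fibLoop_eq n (by omega)]

theorem dfLoop_spec (x : Int) : ∀ (fuel n : Nat), 1 ≤ n →
    (∀ k, 1 ≤ k → k < n → F k < x) → (∃ m, n ≤ m ∧ m < n + fuel ∧ x ≤ F m) →
    ∃ N : Nat, dfLoop x (n : Int) fuel = (N : Int) ∧ 1 ≤ N ∧ x ≤ F N ∧
      ∀ k, 1 ≤ k → k < N → F k < x := by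
  intro fuel
  induction fuel with
  | zero => intro n _ _ ⟨m, hm⟩; omega
  | succ f ih =>
    intro n hn hlt ⟨m, hm1, hm2, hm3⟩
    rw [dfLoop]
    rw [fibA_eq n hn]
    by_cases hc : F n < x
    · rw [if_pos hc]
      have : ((n : Int) + 1) = ((n + 1 : Nat) : Int) := by push_cast; ring
      rw [this]
      refine ih (n+1) (by omega) ?_ ⟨m, ?_, by omega, hm3⟩
      · intro k hk1 hk2
        rcases Nat.lt_or_ge k n with h | h
        · exact hlt k hk1 h
        · have : k = n := by omega
          subst this; exact hc
      · rcases Nat.eq_or_lt_of_le hm1 with h | h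
        · subst h; omega
        · omega
    · rw [if_neg hc]
      exact ⟨n, rfl, hn, by omega, hlt⟩

theorem F47 : F 47 = 2971215073 := by
  unfold F
  norm_num [show Nat.fib 47 = 2971215073 from by decide]

theorem dfA_spec (x : Int) (hx : x ≤ 2147483648) :
    ∃ N : Nat, dfA x = (N : Int) ∧ 1 ≤ N ∧ x ≤ F N ∧ ∀ k, 1 ≤ k → k < N → F k < x := by
  have := dfLoop_spec x 100 1 (by omega) (by omega) ⟨47, by omega, by omega, by rw [F47]; omega⟩
  simpa [dfA] using this

-- ---- A-side characterisation ----
theorem innerFold (x : Int) (i : Nat) (hi1 : 1 ≤ i) : ∀ (c : Nat), i ≤ c → ∀ z : Int,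
    (PySem.List.pyRange ((i : Int) + 1) ((c : Int) + 1) 1).foldl
      (fun (sz : Int × Int) (j : Int) =>
        let s' := sz.1 + fibA j
        (s', if s' == x then 1 else sz.2)) (fibA (i : Int), z)
    = (SF i c, if ∃ j < c + 1, i < j ∧ SF i j = x then 1 else z) := by
  intro c hic
  induction c, hic using Nat.le_induction with
  | base =>
    intro z
    rw [PySem.List.pyRange_one_eq_nil (by omega), List.foldl_nil, fibA_eq i hi1, SF_self]
    have hcond : ¬ ∃ j < i + 1, i < j ∧ SF i j = x := by
      rintro ⟨j, hj, hij, -⟩; omega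
    rw [if_neg hcond]
  | succ c hc ih =>
    intro z
    have hcast : (((c + 1 : Nat) : Int) + 1) = ((c : Int) + 1) + 1 := by push_cast; ring
    rw [hcast, PySem.List.pyRange_one_succ_right (by omega), List.foldl_append, ih z,
      List.foldl_cons, List.foldl_nil]
    have hfib : fibA ((c : Int) + 1) = F (c + 1) := by
      have : ((c : Int) + 1) = ((c + 1 : Nat) : Int) := by push_cast; ring
      rw [this, fibA_eq (c + 1) (by omega)]
    have hsf : SF i c + F (c + 1) = SF i (c + 1) := (SF_succ_top (by omega)).symm
    simp only [hfib, hsf]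
    by_cases hx : SF i (c + 1) = x
    · have hex : ∃ j < c + 1 + 1, i < j ∧ SF i j = x := ⟨c + 1, by omega, by omega, hx⟩
      have hbeq : (SF i (c + 1) == x) = true := by simp [hx]
      rw [hbeq, if_pos rfl, if_pos hex]
    · have hiff : (∃ j < c + 1 + 1, i < j ∧ SF i j = x) ↔ (∃ j < c + 1, i < j ∧ SF i j = x) := by
        constructor
        · rintro ⟨j, hj, hij, hsfj⟩
          refine ⟨j, ?_, hij, hsfj⟩
          rcases Nat.lt_or_ge j (c + 1) with h | h
          · exact h
          · have : j = c + 1 := by omega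
            subst this; exact absurd hsfj hx
        · rintro ⟨j, hj, hij, hsfj⟩; exact ⟨j, by omega, hij, hsfj⟩
      have hbeq : (SF i (c + 1) == x) = false := by simp [hx]
      rw [hbeq]
      simp only [Bool.false_eq_true, if_false, hiff]

theorem outerFold (x : Int) (N : Nat) (hN : 1 ≤ N) : ∀ b : Nat, 1 ≤ b → b ≤ N →
    (PySem.List.pyRange 1 (b : Int) 1).foldl
      (fun (z : Int) (i : Int) =>
        ((PySem.List.pyRange (i + 1) ((N : Nat) : Int) 1).foldl
          (fun (sz : Int × Int) (j : Int) =>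
            let s' := sz.1 + fibA j
            (s', if s' == x then 1 else sz.2)) (fibA i, z)).2) 0
    = if ∃ i < b, ∃ j < N, 1 ≤ i ∧ i < j ∧ SF i j = x then 1 else 0 := by
  intro b hb1
  induction b, hb1 using Nat.le_induction with
  | base =>
    intro _
    rw [show ((1 : Nat) : Int) = 1 by norm_num, PySem.List.pyRange_one_eq_nil (by omega),
      List.foldl_nil]
    have : ¬ ∃ i < 1, ∃ j < N, 1 ≤ i ∧ i < j ∧ SF i j = x := by
      rintro ⟨i, hi, -, -, h1, -⟩; omega
    rw [if_neg this]
  | succ b hb ih =>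
    intro hbN
    have hcast : ((b + 1 : Nat) : Int) = (b : Int) + 1 := by push_cast; ring
    rw [hcast, PySem.List.pyRange_one_succ_right (by exact_mod_cast hb), List.foldl_append,
      ih (by omega), List.foldl_cons, List.foldl_nil]
    obtain ⟨c, rfl⟩ : ∃ c, N = c + 1 := ⟨N - 1, by omega⟩
    have hcast2 : ((c + 1 : Nat) : Int) = ((c : Nat) : Int) + 1 := by push_cast; ring
    rw [hcast2, innerFold x b hb c (by omega)]
    by_cases h1 : ∃ j < c + 1, b < j ∧ SF b j = x
    · have hex : ∃ i < b + 1, ∃ j < c + 1, 1 ≤ i ∧ i < j ∧ SF i j = x := by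
        obtain ⟨j, hj, hbj, hsf⟩ := h1
        exact ⟨b, by omega, j, hj, hb, hbj, hsf⟩
      rw [if_pos h1, if_pos hex]
    · rw [if_neg h1]
      by_cases h2 : ∃ i < b, ∃ j < c + 1, 1 ≤ i ∧ i < j ∧ SF i j = x
      · have hex : ∃ i < b + 1, ∃ j < c + 1, 1 ≤ i ∧ i < j ∧ SF i j = x := by
          obtain ⟨i, hi, j, hj, h1i, hij, hsf⟩ := h2
          exact ⟨i, by omega, j, hj, h1i, hij, hsf⟩
        rw [if_pos h2, if_pos hex]
      · have hnex : ¬ ∃ i < b + 1, ∃ j < c + 1, 1 ≤ i ∧ i < j ∧ SF i j = x := by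
          rintro ⟨i, hi, j, hj, h1i, hij, hsf⟩
          rcases Nat.lt_or_ge i b with h | h
          · exact h2 ⟨i, h, j, hj, h1i, hij, hsf⟩
          · have : i = b := by omega
            subst this
            exact h1 ⟨j, hj, hij, hsf⟩
        rw [if_neg h2, if_neg hnex]

theorem pdc_char (x : Int) (N : Nat) (hdf : dfA x = (N : Int)) (hN : 1 ≤ N) :
    (pdc x = false ↔ ∃ i j : Nat, 1 ≤ i ∧ i < j ∧ j < N ∧ SF i j = x) := by
  unfold pdc
  rw [hdf, outerFold x N hN N hN (le_refl N)]
  by_cases h : ∃ i < N, ∃ j < N, 1 ≤ i ∧ i < j ∧ SF i j = x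
  · rw [if_pos h]
    have hval : (have z := (1 : Int); if (z == 1) = true then false else true) = false := rfl
    rw [hval]
    constructor
    · intro _
      obtain ⟨i, hi, j, hj, h1, h2, h3⟩ := h
      exact ⟨i, j, h1, h2, hj, h3⟩
    · intro _; rfl
  · rw [if_neg h]
    have hval : (have z := (0 : Int); if (z == 1) = true then false else true) = true := rfl
    rw [hval]
    constructor
    · intro ht; exact absurd ht (by decide)
    · rintro ⟨i, j, h1, h2, h3, h4⟩
      exact absurd ⟨i, by omega, j, h3, h1, h2, h4⟩ h


-- ---- B-side: the fib table ----
theorem buildFibs_go (x : Int) : ∀ (fuel n : Nat), 2 ≤ n →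
    (∀ k, 2 ≤ k → k < n → F k < x) → (∃ m, n ≤ m ∧ m < n + fuel ∧ x ≤ F m) →
    ∃ L, buildFibs x fuel ((List.range' 1 n).map F) (F (n - 1)) (F n) =
        (List.range' 1 L).map F ∧ n ≤ L ∧ x ≤ F L ∧ ∀ k, 2 ≤ k → k < L → F k < x := by
  intro fuel
  induction fuel with
  | zero => intro n _ _ ⟨m, hm⟩; omega
  | succ f ih =>
    intro n hn hlt ⟨m, hm1, hm2, hm3⟩
    rw [buildFibs]
    by_cases hc : F n < x
    · rw [if_pos hc]
      have hsum : F (n - 1) + F n = F (n + 1) := by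
        have h := F_add_two (n - 1)
        have e1 : n - 1 + 2 = n + 1 := by omega
        have e2 : n - 1 + 1 = n := by omega
        rw [e1, e2] at h
        omega
      have hconcat : (List.range' 1 n).map F ++ [F (n - 1) + F n] =
          (List.range' 1 (n + 1)).map F := by
        rw [List.range'_1_concat, List.map_append, hsum]
        simp [Nat.add_comm]
      rw [hconcat]
      have he : F n = F (n + 1 - 1) := by norm_num
      rw [hsum, he]
      refine (ih (n + 1) (by omega) ?_ ⟨m, ?_, by omega, hm3⟩).imp ?_
      · intro k hk1 hk2
        rcases Nat.lt_or_ge k n with h | h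
        · exact hlt k hk1 h
        · have : k = n := by omega
          subst this; exact hc
      · rcases Nat.eq_or_lt_of_le hm1 with h | h
        · subst h; omega
        · omega
      · intro L ⟨ha, hb', hc', hd⟩
        exact ⟨ha, by omega, hc', hd⟩
    · rw [if_neg hc]
      exact ⟨n, rfl, le_refl n, by omega, hlt⟩

theorem buildFibs_spec (x : Int) (hx : x ≤ 2147483648) :
    ∃ L : Nat, buildFibs x 100 [1, 1] 1 1 = (List.range' 1 L).map F ∧ 2 ≤ L ∧ x ≤ F L ∧
      ∀ k, 2 ≤ k → k < L → F k < x := by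
  have heq : buildFibs x 100 [1, 1] 1 1 =
      buildFibs x 100 ((List.range' 1 2).map F) (F (2 - 1)) (F 2) := by
    rw [show (List.range' 1 2).map F = [1, 1] from by decide,
      show F (2 - 1) = 1 from by decide, show F 2 = 1 from by decide]
  rw [heq]
  exact buildFibs_go x 100 2 (le_refl 2) (fun k hk1 hk2 => by omega)
    ⟨47, by omega, by omega, by rw [F47]; omega⟩

-- fibs[t] is the (t+1)-st Fibonacci number
theorem fibs_get (L t : Nat) (h : t < L) :
    PySem.List.pyGetD ((List.range' 1 L).map F) ((t : Nat) : Int) 0 = F (t + 1) := by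
  rw [PySem.List.pyGetD_natCast]
  have h2 : t < ((List.range' 1 L).map F).length := by simp [h]
  rw [List.getD_eq_getElem _ _ h2]
  simp [List.getElem_range', Nat.add_comm]

-- ---- B-side: sliding window ----
theorem shrink_spec (x : Int) (L : Nat) (hi : Nat) (hhi : hi < L) :
    ∀ (d lo : Nat) (s : Int), hi - lo ≤ d → lo ≤ hi → s = SF (lo + 1) (hi + 1) →
      (∀ l, l < lo → x < SF (l + 1) (hi + 1)) →
      ∃ lo' : Nat, shrink x ((List.range' 1 L).map F) (hi : Int) (lo : Int) s =
          ((lo' : Int), SF (lo' + 1) (hi + 1)) ∧ lo ≤ lo' ∧ lo' ≤ hi ∧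
        (∀ l, l < lo' → x < SF (l + 1) (hi + 1)) ∧ (SF (lo' + 1) (hi + 1) ≤ x ∨ lo' = hi) := by
  intro d
  induction d with
  | zero =>
    intro lo s hd hlo hs hinv
    have : lo = hi := by omega
    subst this
    rw [shrink, dif_neg (by omega)]
    exact ⟨lo, by rw [hs], le_refl lo, le_refl lo, hinv, Or.inr rfl⟩
  | succ d ih =>
    intro lo s hd hlo hs hinv
    rw [shrink]
    by_cases hcond : s > x ∧ (lo : Int) < (hi : Int)
    · rw [dif_pos hcond]
      have hlohi : lo < hi := by exact_mod_cast hcond.2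
      rw [fibs_get L lo (by omega)]
      have hsplit : SF (lo + 1) (hi + 1) = F (lo + 1) + SF (lo + 1 + 1) (hi + 1) :=
        SF_succ_bot (by omega)
      have hs' : s - F (lo + 1) = SF (lo + 1 + 1) (hi + 1) := by omega
      have hcast : (lo : Int) + 1 = ((lo + 1 : Nat) : Int) := by push_cast; ring
      rw [hcast, hs']
      refine (ih (lo + 1) _ (by omega) (by omega) rfl ?_).imp ?_
      · intro l hl
        rcases Nat.lt_or_ge l lo with h | h
        · exact hinv l h
        · have : l = lo := by omega
          subst this
          omega
      · intro lo' ⟨ha, hb', hc', hd', he'⟩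
        exact ⟨ha, by omega, hc', hd', he'⟩
    · rw [dif_neg hcond]
      refine ⟨lo, by rw [hs], le_refl lo, hlo, hinv, ?_⟩
      rcases Nat.lt_or_ge lo hi with h | h
      · left
        have hng : ¬ s > x := by
          intro hgt
          exact hcond ⟨hgt, by exact_mod_cast h⟩
        omega
      · right; omega

theorem slideGo_spec (x : Int) (L : Nat) : ∀ (d h lo : Nat) (s : Int), L - h ≤ d → h ≤ L →
    lo ≤ h → s = SF (lo + 1) h → (∀ l, l < lo → x < SF (l + 1) h) →
    (slideGo x ((List.range' 1 L).map F) (PySem.List.pyRange (h : Int) (L : Int) 1)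
        (lo : Int) s = false ↔
      ∃ hi lo' : Nat, h ≤ hi ∧ hi < L ∧ lo' < hi ∧ SF (lo' + 1) (hi + 1) = x) := by
  intro d
  induction d with
  | zero =>
    intro h lo s hd hh hlo hs hinv
    have : h = L := by omega
    subst this
    rw [PySem.List.pyRange_one_eq_nil (le_refl _), slideGo]
    constructor
    · intro ht; exact absurd ht (by decide)
    · rintro ⟨hi, lo', h1, h2, -, -⟩; omega
  | succ d ih =>
    intro h lo s hd hh hlo hs hinv
    rcases Nat.lt_or_ge h L with hhL | hhL
    swap
    · have : h = L := by omega
      subst this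
      rw [PySem.List.pyRange_one_eq_nil (le_refl _), slideGo]
      constructor
      · intro ht; exact absurd ht (by decide)
      · rintro ⟨hi, lo', h1, h2, -, -⟩; omega
    · rw [PySem.List.pyRange_one_cons (by exact_mod_cast hhL), slideGo]
      rw [fibs_get L h hhL]
      have hs1 : s + F (h + 1) = SF (lo + 1) (h + 1) := by
        rw [hs, SF_succ_top (by omega)]
      rw [hs1]
      have hinv1 : ∀ l, l < lo → x < SF (l + 1) (h + 1) := by
        intro l hl
        have h1 := hinv l hl
        have h2 : SF (l + 1) (h + 1) = SF (l + 1) h + F (h + 1) := SF_succ_top (by omega)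
        have h3 := F_one_le (n := h + 1) (by omega)
        omega
      obtain ⟨lo', hseq, hge, hle, hinv', hstop⟩ :=
        shrink_spec x L h hhL h lo _ (by omega) hlo rfl hinv1
      rw [hseq]
      by_cases hwin : ∃ l, l < h ∧ SF (l + 1) (h + 1) = x
      · obtain ⟨l, hlh, hsfx⟩ := hwin
        have hlo'l : lo' = l := by
          rcases Nat.lt_trichotomy lo' l with h1 | h1 | h1
          · exfalso
            have hne : lo' ≠ h := by omega
            have hle' : SF (lo' + 1) (h + 1) ≤ x := hstop.resolve_right hne
            have := SF_strict (l := lo' + 1) (l' := l + 1) (j := h + 1)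
              (by omega) (by omega) (by omega)
            omega
          · exact h1
          · exact absurd hsfx (by have := hinv' l h1; omega)
        subst hlo'l
        have hb1 : (SF (lo' + 1) (h + 1) == x) = true := by simp [hsfx]
        have hb2 : (decide ((lo' : Int) < (h : Int))) = true := by
          simp only [decide_eq_true_eq]
          exact_mod_cast hlh
        rw [hb1, hb2]
        norm_num
        exact ⟨h, le_refl h, hhL, lo', hlh, hsfx⟩
      · have hbc : ((SF (lo' + 1) (h + 1) == x) && (decide ((lo' : Int) < (h : Int)))) = false := by
          by_cases h1 : SF (lo' + 1) (h + 1) = x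
          · have h2 : ¬ lo' < h := fun hlt => hwin ⟨lo', hlt, h1⟩
            have h3 : (decide ((lo' : Int) < (h : Int))) = false := by
              simp only [decide_eq_false_iff_not]
              intro hc'
              exact h2 (by exact_mod_cast hc')
            rw [h3, Bool.and_false]
          · have h3 : (SF (lo' + 1) (h + 1) == x) = false := by simp [h1]
            rw [h3, Bool.false_and]
        rw [hbc]
        simp only [Bool.false_eq_true, if_false]
        have hcast : (h : Int) + 1 = ((h + 1 : Nat) : Int) := by push_cast; ring
        rw [hcast]
        rw [ih (h + 1) lo' _ (by omega) (by omega) (by omega) rfl hinv']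
        constructor
        · rintro ⟨hi2, lo2, hh2, hL2, hlt2, hsf2⟩
          exact ⟨hi2, lo2, by omega, hL2, hlt2, hsf2⟩
        · rintro ⟨hi2, lo2, hh2, hL2, hlt2, hsf2⟩
          refine ⟨hi2, lo2, ?_, hL2, hlt2, hsf2⟩
          rcases Nat.eq_or_lt_of_le hh2 with h1 | h1
          · exact absurd ⟨lo2, by omega, by rw [← h1] at hsf2; exact hsf2⟩ hwin
          · omega

theorem pdc_alt_char (x : Int) (L : Nat) (hL : 2 ≤ L)
    (hfibs : buildFibs x 100 [1, 1] 1 1 = (List.range' 1 L).map F) :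
    (pdc_alt x = false ↔ ∃ i j : Nat, 1 ≤ i ∧ i < j ∧ j ≤ L ∧ SF i j = x) := by
  unfold pdc_alt
  rw [hfibs]
  show slideGo x ((List.range' 1 L).map F)
      (PySem.List.pyRange 0 ((((List.range' 1 L).map F).length : Nat) : Int) 1) 0 0 = false ↔ _
  have hlen : ((((List.range' 1 L).map F).length : Nat) : Int) = ((L : Nat) : Int) := by simp
  rw [hlen]
  have hspec := slideGo_spec x L L 0 0 0 (by omega) (by omega) (by omega)
    (by rw [SF_empty (by omega)]) (by omega)
  simp only [Nat.cast_zero] at hspec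
  rw [hspec]
  constructor
  · rintro ⟨hi, lo', -, hL2, hlt2, hsf2⟩
    exact ⟨lo' + 1, hi + 1, by omega, by omega, by omega, hsf2⟩
  · rintro ⟨i, j, h1, h2, h3, h4⟩
    refine ⟨j - 1, i - 1, by omega, by omega, by omega, ?_⟩
    have e1 : i - 1 + 1 = i := by omega
    have e2 : j - 1 + 1 = j := by omega
    rw [e1, e2]
    exact h4

-- ===== VERDICT (by name: the statement is the Claim_ definition above) =====
theorem pdc_spec : Claim_equal_pdc := by
  intro x hdom
  have hx : x ≤ 2147483648 := by
    have := of_decide_eq_true hdom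
    exact this.2
  obtain ⟨N, hdfN, hN1, hNle, hNlt⟩ := dfA_spec x hx
  obtain ⟨L, hfibs, hL2, hLle, hLlt⟩ := buildFibs_spec x hx
  have hA := pdc_char x N hdfN hN1
  have hB := pdc_alt_char x L hL2 hfibs
  have hbridge : (∃ i j : Nat, 1 ≤ i ∧ i < j ∧ j < N ∧ SF i j = x) ↔
      (∃ i j : Nat, 1 ≤ i ∧ i < j ∧ j ≤ L ∧ SF i j = x) := by
    constructor
    · rintro ⟨i, j, h1, h2, h3, h4⟩
      refine ⟨i, j, h1, h2, ?_, h4⟩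
      have hFj : F j < x := hNlt j (by omega) h3
      by_contra hc
      have hmono : F L ≤ F j := F_mono (by omega)
      omega
    · rintro ⟨i, j, h1, h2, h3, h4⟩
      refine ⟨i, j, h1, h2, ?_, h4⟩
      have hFj : F j < SF i j := SF_gt_last h1 h2
      rw [h4] at hFj
      by_contra hc
      have hmono : F N ≤ F j := F_mono (by omega)
      omega
  have hiff : pdc x = false ↔ pdc_alt x = false := hA.trans (hbridge.trans hB.symm)
  show pdc x = pdc_alt x
  by_cases hpa : pdc x = false
  · rw [hpa, (hiff.mp hpa).symm]
  · have h1 : pdc x = true := by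
      cases hval : pdc x
      · exact absurd hval hpa
      · rfl
    have h2 : pdc_alt x = true := by
      cases hval : pdc_alt x
      · exact absurd (hiff.mpr hval) hpa
      · rfl
    rw [h1, h2]
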